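-- pv_equiv track=rewrite | github.com/MohammadIzza/PBOWEEK2 | UjiKromoson.py | kromosom
-- ===== SOURCE A (Python) =====
-- def kromosom(arr):
--     if len(arr) == 1:
--         return False
--     if(len(arr) >= 2):
--         if(arr[0] == 'X' and arr[1] == 'Y'):
--             return 1 + kromosom(arr[1:])
--         else:
--             return 0 + kromosom(arr[1:])
--     else:
--         return 0 + kromosom(arr[1:])
-- ===== SOURCE B (Python) =====
-- def kromosom(arr):
--     count = 0
--     for a, b in zip(arr, arr[1:]):
--         if a == 'X' and b == 'Y':
--             count += 1
--     return count
-- ===== Notes on version B (the rewrite author's own statement) =====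
-- stated objective: faster
-- what changed: Replaced the O(n^2) recursion that re-slices arr[1:] at every step with a single linear pass over zip(arr, arr[1:]) accumulating the count of adjacent ('X','Y') pairs.
-- outside the precondition, e.g. on kromosom(['X']): A returns False, B returns 0
import Mathlib
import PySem

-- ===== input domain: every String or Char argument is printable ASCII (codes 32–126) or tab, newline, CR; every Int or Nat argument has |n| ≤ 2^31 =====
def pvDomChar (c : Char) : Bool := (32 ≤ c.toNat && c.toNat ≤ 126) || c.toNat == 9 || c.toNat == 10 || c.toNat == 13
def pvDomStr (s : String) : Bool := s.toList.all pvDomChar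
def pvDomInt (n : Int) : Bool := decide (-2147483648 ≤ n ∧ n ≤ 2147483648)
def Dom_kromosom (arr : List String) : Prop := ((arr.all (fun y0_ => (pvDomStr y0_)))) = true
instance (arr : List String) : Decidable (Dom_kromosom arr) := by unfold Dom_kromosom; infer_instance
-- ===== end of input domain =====

-- B replaces A's O(n^2) re-slicing recursion with one linear scan over adjacent pairs.


-- ===== PORT A =====
-- Literal transliteration of A's recursion (arr[1:] is the tail); the [] and [_]
-- cases are outside Pre_kromosom: on [] the Python diverges (RecursionError) and on
-- a singleton it returns False, not an int.
def kromosom (arr : List String) : Int :=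
  match arr with
  | [] => 0
  | [_] => 0
  | a :: b :: rest =>
      if a = "X" ∧ b = "Y" then 1 + kromosom (b :: rest)
      else 0 + kromosom (b :: rest)

-- ===== PORT B =====
def kromosom_alt (arr : List String) : Int :=
  (arr.zip arr.tail).foldl
    (fun count p => if p.1 = "X" ∧ p.2 = "Y" then count + 1 else count) 0

-- ===== PRECONDITION & SPEC =====
-- Pre_ excludes the empty list, on which A raises RecursionError, and singleton
-- lists, on which A returns False instead of an int.
def Pre_kromosom (arr : List String) : Prop := 2 ≤ arr.length
instance (arr : List String) : Decidable (Pre_kromosom arr) := by unfold Pre_kromosom; infer_instance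
def pvWitness_kromosom : List String := ["X", "Y"]

def Spec_kromosom (arr : List String) (out : Int) : Prop := out = kromosom_alt arr
instance (arr : List String) (out : Int) : Decidable (Spec_kromosom arr out) := by unfold Spec_kromosom; infer_instance

-- ===== CLAIM (what is proved, stated in full; the proofs are below) =====
def Claim_equal_kromosom : Prop := ∀ (arr : List String), Dom_kromosom arr → Pre_kromosom arr → Spec_kromosom arr (kromosom arr)

-- ===== LEMMAS AND PROOFS =====
theorem foldl_count_shift (c : Int) (l : List (String × String)) :
    l.foldl (fun count p => if p.1 = "X" ∧ p.2 = "Y" then count + 1 else count) c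
      = c + l.foldl (fun count p => if p.1 = "X" ∧ p.2 = "Y" then count + 1 else count) 0 := by
  induction l generalizing c with
  | nil => simp
  | cons p t ih =>
    simp only [List.foldl_cons]
    rw [ih, ih (if p.1 = "X" ∧ p.2 = "Y" then 0 + 1 else 0)]
    split_ifs <;> omega

theorem kromosom_eq_alt (arr : List String) : kromosom arr = kromosom_alt arr := by
  induction arr with
  | nil => decide
  | cons a t ih =>
    cases t with
    | nil => simp [kromosom, kromosom_alt]
    | cons b rest =>
      simp only [kromosom, kromosom_alt, List.tail_cons, List.zip_cons_cons, List.foldl_cons]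
      rw [foldl_count_shift]
      have h := ih
      simp only [kromosom_alt, List.tail_cons] at h
      rw [h]
      split_ifs <;> omega

-- ===== VERDICT (by name: the statement is the Claim_ definition above) =====
theorem kromosom_spec : Claim_equal_kromosom := by
  intro arr _ _
  exact kromosom_eq_alt arr
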